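-- pv_equiv track=rewrite | github.com/jameshope87/Advent-of-Code-2023 | day11/day11.py | addExtra
-- ===== SOURCE A (Python) =====
-- def addExtra(point1: tuple[int,int],
--              point2: tuple[int,int],
--              emptyRows: list[int],
--              emptyCols: list[int],
--              expansionFactor: int) -> int:
--   extra = 0
--   minx, maxx = (point1[0],point2[0]) if point1[0] < point2[0] else (point2[0],point1[0])
--   for row in emptyRows:
--     if minx < row < maxx:
--       extra += expansionFactor - 1
--   miny, maxy = (point1[1],point2[1]) if point1[1] < point2[1] else (point2[1],point1[1])
--   for col in emptyCols:
--     if miny < col < maxy: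
--       extra += expansionFactor - 1
--   return extra
-- ===== SOURCE B (Python) =====
-- def addExtra(point1, point2, emptyRows, emptyCols, expansionFactor):
--     def strictlyBetween(vals, a, b):
--         lo, hi = (a, b) if a < b else (b, a)
--         count = 0
--         for v in sorted(vals):
--             if v <= lo:
--                 continue
--             if v >= hi:
--                 break
--             count += 1
--         return count
--     return (expansionFactor - 1) * (strictlyBetween(emptyRows, point1[0], point2[0])
--                                     + strictlyBetween(emptyCols, point1[1], point2[1]))
-- ===== Notes on version B (the rewrite author's own statement) =====
-- stated objective: alternative
-- what changed: B sorts each empty-line list once and counts the strictly-between elements with an early-exit scan over the sorted list (skip while <= lo, stop at the first >= hi), multiplying the total count by (expansionFactor-1) once, instead of A's two unsorted full scans that add expansionFactor-1 per hit.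
import Mathlib
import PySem

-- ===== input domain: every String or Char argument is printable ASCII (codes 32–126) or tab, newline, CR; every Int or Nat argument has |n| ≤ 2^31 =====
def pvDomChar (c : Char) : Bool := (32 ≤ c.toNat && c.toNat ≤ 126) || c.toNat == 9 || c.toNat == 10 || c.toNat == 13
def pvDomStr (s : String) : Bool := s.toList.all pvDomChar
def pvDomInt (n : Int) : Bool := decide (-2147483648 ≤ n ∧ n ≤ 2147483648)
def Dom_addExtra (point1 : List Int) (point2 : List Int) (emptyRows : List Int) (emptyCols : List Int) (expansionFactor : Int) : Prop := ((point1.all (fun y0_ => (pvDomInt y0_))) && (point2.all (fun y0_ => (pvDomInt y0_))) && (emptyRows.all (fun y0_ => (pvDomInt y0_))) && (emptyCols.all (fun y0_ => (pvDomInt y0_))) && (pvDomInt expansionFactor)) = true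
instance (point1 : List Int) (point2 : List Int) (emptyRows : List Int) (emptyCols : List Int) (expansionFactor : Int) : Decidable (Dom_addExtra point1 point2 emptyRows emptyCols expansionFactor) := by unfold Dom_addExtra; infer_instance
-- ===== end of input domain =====

-- B sorts each empty-line list and counts strictly-between elements with an early-exit scan,
-- multiplying the count by (expansionFactor-1) once; alternative structure, not claimed faster.


-- ===== PORT A =====
-- point1[0] etc.: in range under Pre_ (both points have length ≥ 2), so .getD 0 is exact there
def addExtra (point1 : List Int) (point2 : List Int) (emptyRows : List Int) (emptyCols : List Int) (expansionFactor : Int) : Int :=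
  let p10 := (PySem.List.pyGet? point1 0).getD 0
  let p20 := (PySem.List.pyGet? point2 0).getD 0
  let mm := if p10 < p20 then (p10, p20) else (p20, p10)
  let extra := emptyRows.foldl
    (fun extra row => if mm.1 < row ∧ row < mm.2 then extra + (expansionFactor - 1) else extra) 0
  let p11 := (PySem.List.pyGet? point1 1).getD 0
  let p21 := (PySem.List.pyGet? point2 1).getD 0
  let nn := if p11 < p21 then (p11, p21) else (p21, p11)
  emptyCols.foldl
    (fun extra col => if nn.1 < col ∧ col < nn.2 then extra + (expansionFactor - 1) else extra) extra

-- ===== PORT B =====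
-- the for-loop over sorted(vals) with continue/break
def sbLoop (lo hi : Int) : List Int → Int
  | [] => 0
  | v :: rest =>
    if v ≤ lo then sbLoop lo hi rest
    else if hi ≤ v then 0
    else sbLoop lo hi rest + 1

def strictlyBetween (vals : List Int) (a b : Int) : Int :=
  let lh := if a < b then (a, b) else (b, a)
  sbLoop lh.1 lh.2 (PySem.List.sorted vals (fun x => x) false)

def addExtra_alt (point1 : List Int) (point2 : List Int) (emptyRows : List Int) (emptyCols : List Int) (expansionFactor : Int) : Int :=
  (expansionFactor - 1) *
    (strictlyBetween emptyRows ((PySem.List.pyGet? point1 0).getD 0) ((PySem.List.pyGet? point2 0).getD 0)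
     + strictlyBetween emptyCols ((PySem.List.pyGet? point1 1).getD 0) ((PySem.List.pyGet? point2 1).getD 0))

-- ===== PRECONDITION & SPEC =====
-- A raises IndexError unless both points have at least two coordinates
def Pre_addExtra (point1 : List Int) (point2 : List Int) (emptyRows : List Int) (emptyCols : List Int) (expansionFactor : Int) : Prop :=
  2 ≤ point1.length ∧ 2 ≤ point2.length
instance (point1 : List Int) (point2 : List Int) (emptyRows : List Int) (emptyCols : List Int) (expansionFactor : Int) : Decidable (Pre_addExtra point1 point2 emptyRows emptyCols expansionFactor) := by unfold Pre_addExtra; infer_instance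

def pvWitness_addExtra : List Int × List Int × List Int × List Int × Int := ([1, 2], [7, 5], [3, 6], [4, 3], 10)

def Spec_addExtra (point1 : List Int) (point2 : List Int) (emptyRows : List Int) (emptyCols : List Int) (expansionFactor : Int) (out : Int) : Prop := out = addExtra_alt point1 point2 emptyRows emptyCols expansionFactor
instance (point1 : List Int) (point2 : List Int) (emptyRows : List Int) (emptyCols : List Int) (expansionFactor : Int) (out : Int) : Decidable (Spec_addExtra point1 point2 emptyRows emptyCols expansionFactor out) := by unfold Spec_addExtra; infer_instance

-- ===== CLAIM (what is proved, stated in full; the proofs are below) =====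
def Claim_equal_addExtra : Prop := ∀ (point1 : List Int) (point2 : List Int) (emptyRows : List Int) (emptyCols : List Int) (expansionFactor : Int), Dom_addExtra point1 point2 emptyRows emptyCols expansionFactor → Pre_addExtra point1 point2 emptyRows emptyCols expansionFactor → Spec_addExtra point1 point2 emptyRows emptyCols expansionFactor (addExtra point1 point2 emptyRows emptyCols expansionFactor)

-- ===== LEMMAS AND PROOFS =====

-- A's loop shape: fold adding a constant per hit = constant times the hit count
theorem foldl_hit_count (lo hi c : Int) (xs : List Int) (init : Int) :
    xs.foldl (fun acc v => if lo < v ∧ v < hi then acc + c else acc) init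
      = init + c * (xs.countP (fun v => decide (lo < v ∧ v < hi)) : Int) := by
  induction xs generalizing init with
  | nil => simp
  | cons v rest ih =>
    simp only [List.foldl_cons, List.countP_cons, ih]
    by_cases h : lo < v ∧ v < hi <;> simp [h] <;> push_cast <;> ring

-- B's early-exit scan on a sorted list counts exactly the strictly-between elements
theorem sbLoop_countP (lo hi : Int) (xs : List Int)
    (hs : xs.Pairwise (· ≤ ·)) :
    sbLoop lo hi xs = (xs.countP (fun v => decide (lo < v ∧ v < hi)) : Int) := by
  induction xs with
  | nil => simp [sbLoop]
  | cons v rest ih =>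
    rcases List.pairwise_cons.mp hs with ⟨hv, hrest⟩
    simp only [sbLoop]
    by_cases h1 : v ≤ lo
    · rw [if_pos h1, ih hrest, List.countP_cons]
      have hd : (decide (lo < v ∧ v < hi)) = false := by
        simp only [decide_eq_false_iff_not]; omega
      rw [hd]; norm_num
    · rw [if_neg h1]
      by_cases h2 : hi ≤ v
      · rw [if_pos h2]
        have hz : (v :: rest).countP (fun w => decide (lo < w ∧ w < hi)) = 0 := by
          rw [List.countP_eq_zero]
          intro w hw
          simp only [decide_eq_true_eq]
          rcases List.mem_cons.mp hw with rfl | hw'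
          · omega
          · have := hv w hw'; omega
        rw [hz]; simp
      · rw [if_neg h2, ih hrest, List.countP_cons]
        have hd : (decide (lo < v ∧ v < hi)) = true := by
          simp only [decide_eq_true_eq]; omega
        rw [hd]; simp [Int.add_comm]

theorem strictlyBetween_lt (vals : List Int) (a b : Int) (h : a < b) :
    strictlyBetween vals a b = (vals.countP (fun v => decide (a < v ∧ v < b)) : Int) := by
  unfold strictlyBetween
  rw [if_pos h]
  show sbLoop (a, b).1 (a, b).2 (PySem.List.sorted vals (fun x => x) false) = _
  rw [sbLoop_countP _ _ _ (PySem.List.sorted_pairwise (xs := vals) (key := fun x : Int => x))]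
  exact_mod_cast (PySem.List.sorted_perm (xs := vals) (key := fun x : Int => x) (rev := false)).countP_eq _

theorem strictlyBetween_ge (vals : List Int) (a b : Int) (h : ¬ a < b) :
    strictlyBetween vals a b = (vals.countP (fun v => decide (b < v ∧ v < a)) : Int) := by
  unfold strictlyBetween
  rw [if_neg h]
  show sbLoop (b, a).1 (b, a).2 (PySem.List.sorted vals (fun x => x) false) = _
  rw [sbLoop_countP _ _ _ (PySem.List.sorted_pairwise (xs := vals) (key := fun x : Int => x))]
  exact_mod_cast (PySem.List.sorted_perm (xs := vals) (key := fun x : Int => x) (rev := false)).countP_eq _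

theorem addExtra_spec : Claim_equal_addExtra := by
  intro point1 point2 emptyRows emptyCols expansionFactor _ _
  unfold Spec_addExtra addExtra addExtra_alt
  by_cases h1 : (PySem.List.pyGet? point1 0).getD 0 < (PySem.List.pyGet? point2 0).getD 0 <;>
    by_cases h2 : (PySem.List.pyGet? point1 1).getD 0 < (PySem.List.pyGet? point2 1).getD 0
  · simp only [if_pos h1, if_pos h2, foldl_hit_count,
      strictlyBetween_lt _ _ _ h1, strictlyBetween_lt _ _ _ h2]
    ring
  · simp only [if_pos h1, if_neg h2, foldl_hit_count,
      strictlyBetween_lt _ _ _ h1, strictlyBetween_ge _ _ _ h2]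
    ring
  · simp only [if_neg h1, if_pos h2, foldl_hit_count,
      strictlyBetween_ge _ _ _ h1, strictlyBetween_lt _ _ _ h2]
    ring
  · simp only [if_neg h1, if_neg h2, foldl_hit_count,
      strictlyBetween_ge _ _ _ h1, strictlyBetween_ge _ _ _ h2]
    ring
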